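-- pv_equiv track=rewrite | github.com/PritiKalaskar1234/Nexthikes_Calculator_Python_Repository | calci060525.py | get_after_last_operator
-- ===== SOURCE A (Python) =====
-- def get_after_last_operator(s):
--     # Extracts the last operand after an operator or parenthesis
--     if s and s[-1] == ')':
--         count = 0
--         for i in range(len(s) - 1, -1, -1):
--             if s[i] == ')': count += 1
--             elif s[i] == '(':
--                 count -= 1
--                 if count == 0:
--                     if i > 0:
--                         return s[:i - 1], s[i - 1], s[i:]
--                     else:
--                         return "", "", s
--         return "", "", s
--     for i in range(len(s) - 1, -1, -1):
--         if s[i] in '+-x/%':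
--             return s[:i], s[i], s[i + 1:]
--     return "", "", s
-- ===== SOURCE B (Python) =====
-- def get_after_last_operator(s):
--     # Forward single pass with an explicit paren stack (instead of A's backward
--     # depth-counting scan); operator case keeps the last operator seen forward.
--     if s and s[-1] == ')':
--         stack = []
--         match = None
--         i = 0
--         for c in s:
--             if c == '(':
--                 stack.append(i)
--             elif c == ')':
--                 match = stack.pop() if stack else None
--             i += 1
--         if match is not None and match > 0:
--             return s[:match - 1], s[match - 1], s[match:]
--         return "", "", s
--     last = None
--     i = 0
--     for c in s:
--         if c in '+-x/%':
--             last = i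
--         i += 1
--     if last is None:
--         return "", "", s
--     return s[:last], s[last], s[last + 1:]
-- ===== Notes on version B (the rewrite author's own statement) =====
-- stated objective: alternative
-- what changed: A's two backward scans (a depth counter to find the '(' matching the final ')', and a right-to-left search for the last operator) are replaced by forward single passes: an explicit stack of '(' indices whose pop at the final ')' yields the match, and a forward scan keeping the last operator index seen.
import Mathlib
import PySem

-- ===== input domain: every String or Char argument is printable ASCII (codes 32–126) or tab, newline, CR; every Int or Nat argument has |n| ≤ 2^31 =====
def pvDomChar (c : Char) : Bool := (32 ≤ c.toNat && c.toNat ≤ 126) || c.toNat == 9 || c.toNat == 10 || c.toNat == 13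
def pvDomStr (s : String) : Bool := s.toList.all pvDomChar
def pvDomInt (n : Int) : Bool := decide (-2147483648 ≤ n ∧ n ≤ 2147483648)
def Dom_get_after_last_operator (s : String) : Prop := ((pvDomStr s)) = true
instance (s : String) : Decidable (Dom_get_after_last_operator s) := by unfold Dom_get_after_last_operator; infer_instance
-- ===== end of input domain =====

-- B replaces A's backward depth-counting scans with forward single passes
-- (an explicit '('-index stack for the paren case, last-seen index for the
-- operator case); objective: alternative (same cost, different traversal).

-- ===== PORT A =====

def pvOps : List Char := ['+', '-', 'x', '/', '%']

-- A's paren loop: `for i in range(len(s)-1,-1,-1)` walking s backward with a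
-- depth counter; ported as structural recursion over s.reverse carrying the
-- current index i (decreasing by 1 each step) and the count.
def pvAParen : List Char → Nat → Int → Option Nat
  | [], _, _ => none
  | c :: rest, i, count =>
      if c = ')' then pvAParen rest (i - 1) (count + 1)
      else if c = '(' then
        (if count - 1 = 0 then some i else pvAParen rest (i - 1) (count - 1))
      else pvAParen rest (i - 1) count

-- A's operator loop: same backward walk, first hit from the right.
def pvAOp : List Char → Nat → Option Nat
  | [], _ => none
  | c :: rest, i => if c ∈ pvOps then some i else pvAOp rest (i - 1)

def get_after_last_operator (s : String) : String × String × String :=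
  let cs := s.toList
  if cs ≠ [] ∧ cs.getLast? = some ')' then
    match pvAParen cs.reverse (cs.length - 1) 0 with
    | some i =>
        if 0 < i then
          (String.ofList (cs.take (i - 1)), String.ofList [cs.getD (i - 1) ' '], String.ofList (cs.drop i))
        else ("", "", s)
    | none => ("", "", s)
  else
    match pvAOp cs.reverse (cs.length - 1) with
    | some i => (String.ofList (cs.take i), String.ofList [cs.getD i ' '], String.ofList (cs.drop (i + 1)))
    | none => ("", "", s)

-- ===== PORT B =====

-- B's paren loop: one forward pass, state = (running index, stack of '('
-- indices, value of `match` so far); stack.pop() = taking the head.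
def pvStepP (acc : Nat × List Nat × Option Nat) (c : Char) : Nat × List Nat × Option Nat :=
  if c = '(' then (acc.1 + 1, acc.1 :: acc.2.1, acc.2.2)
  else if c = ')' then
    match acc.2.1 with
    | [] => (acc.1 + 1, [], none)
    | j :: rest => (acc.1 + 1, rest, some j)
  else (acc.1 + 1, acc.2.1, acc.2.2)

-- B's operator loop: one forward pass keeping the last operator index seen.
def pvStepO (acc : Nat × Option Nat) (c : Char) : Nat × Option Nat :=
  (acc.1 + 1, if c ∈ pvOps then some acc.1 else acc.2)

def get_after_last_operator_alt (s : String) : String × String × String :=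
  let cs := s.toList
  if cs ≠ [] ∧ cs.getLast? = some ')' then
    match (cs.foldl pvStepP (0, [], none)).2.2 with
    | some i =>
        if 0 < i then
          (String.ofList (cs.take (i - 1)), String.ofList [cs.getD (i - 1) ' '], String.ofList (cs.drop i))
        else ("", "", s)
    | none => ("", "", s)
  else
    match (cs.foldl pvStepO (0, none)).2 with
    | some i => (String.ofList (cs.take i), String.ofList [cs.getD i ' '], String.ofList (cs.drop (i + 1)))
    | none => ("", "", s)

-- ===== PRECONDITION & SPEC =====
def Spec_get_after_last_operator (s : String) (out : String × String × String) : Prop := out = get_after_last_operator_alt s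
instance (s : String) (out : String × String × String) : Decidable (Spec_get_after_last_operator s out) := by unfold Spec_get_after_last_operator; infer_instance

-- ===== CLAIM (what is proved, stated in full; the proofs are below) =====
def Claim_equal_get_after_last_operator : Prop := ∀ (s : String), Dom_get_after_last_operator s → Spec_get_after_last_operator s (get_after_last_operator s)

-- ===== LEMMAS AND PROOFS =====

-- The index component of B's folds counts the elements consumed.
theorem pv_fold_fstP : ∀ (t : List Char) (b : Nat) (st : List Nat) (m : Option Nat),
    (t.foldl pvStepP (b, st, m)).1 = b + t.length := by
  intro t
  induction t with
  | nil => intro b st m; simp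
  | cons c rest ih =>
      intro b st m
      simp only [List.foldl_cons, pvStepP]
      split_ifs
      · rw [ih, List.length_cons]; omega
      · cases st with
        | nil => rw [ih, List.length_cons]; omega
        | cons j r => rw [ih, List.length_cons]; omega
      · rw [ih, List.length_cons]; omega

theorem pv_fold_fstO : ∀ (t : List Char) (b : Nat) (m : Option Nat),
    (t.foldl pvStepO (b, m)).1 = b + t.length := by
  intro t
  induction t with
  | nil => intro b m; simp
  | cons c rest ih => intro b m; simp only [List.foldl_cons, pvStepO]; rw [ih, List.length_cons]; omega

-- Operator case: the backward first-hit equals the forward last-hit.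
theorem pv_op_eq : ∀ (t : List Char),
    pvAOp t.reverse (t.length - 1) = (t.foldl pvStepO (0, none)).2 := by
  intro t
  induction t using List.reverseRecOn with
  | nil => simp [pvAOp]
  | append_singleton u d ih =>
      rw [List.reverse_append, List.foldl_append]
      have hfst := pv_fold_fstO u 0 none
      by_cases hd : d ∈ pvOps
      · simp [pvAOp, pvStepO, hd, hfst]
      · simp only [List.reverse_cons, List.reverse_nil, List.nil_append,
          List.singleton_append, List.length_append, List.length_cons,
          List.length_nil, List.foldl_cons, List.foldl_nil, pvAOp, pvStepO,
          if_neg hd]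
        simpa using ih

-- Unfolding equations for A's backward scan.
theorem pvAParen_close (l : List Char) (i : Nat) (c : Int) :
    pvAParen (')' :: l) i c = pvAParen l (i - 1) (c + 1) := by simp [pvAParen]

theorem pvAParen_open (l : List Char) (i : Nat) (c : Int) :
    pvAParen ('(' :: l) i c = if c - 1 = 0 then some i else pvAParen l (i - 1) (c - 1) := by
  simp [pvAParen]

theorem pvAParen_other (ch : Char) (l : List Char) (i : Nat) (c : Int)
    (h1 : ch ≠ ')') (h2 : ch ≠ '(') :
    pvAParen (ch :: l) i c = pvAParen l (i - 1) c := by simp [pvAParen, h1, h2]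

-- Paren case invariant: scanning t backward with count k+1 yields the k-th
-- entry (from the top) of the stack of unmatched '(' indices of t.
theorem pv_paren_inv : ∀ (t : List Char) (k : Nat),
    pvAParen t.reverse (t.length - 1) ((k : Int) + 1)
      = (t.foldl pvStepP (0, [], none)).2.1[k]? := by
  intro t
  induction t using List.reverseRecOn with
  | nil => intro k; simp [pvAParen]
  | append_singleton u d ih =>
      intro k
      rw [List.reverse_append, List.foldl_append]
      have hfst := pv_fold_fstP u 0 [] none
      simp only [List.reverse_cons, List.reverse_nil, List.nil_append,
        List.singleton_append, List.length_append, List.length_cons,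
        List.length_nil, List.foldl_cons, List.foldl_nil]
      have hidx : u.length + (0 + 1) - 1 - 1 = u.length - 1 := by omega
      by_cases hd1 : d = ')'
      · subst hd1
        rw [pvAParen_close, hidx]
        have hc : (k : Int) + 1 + 1 = ((k + 1 : Nat) : Int) + 1 := by push_cast; ring
        rw [hc, ih (k + 1)]
        cases hstk : (u.foldl pvStepP (0, [], none)).2.1 with
        | nil => simp [pvStepP, hstk]
        | cons j r => simp [pvStepP, hstk]
      · by_cases hd2 : d = '('
        · subst hd2
          rw [pvAParen_open]
          have hsub : (k : Int) + 1 - 1 = (k : Int) := by ring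
          rw [hsub]
          cases k with
          | zero =>
              rw [if_pos (by norm_num)]
              simp [pvStepP, hfst]
          | succ k' =>
              rw [if_neg (by push_cast; omega), hidx]
              have hc : ((k' + 1 : Nat) : Int) = ((k' : Nat) : Int) + 1 := by push_cast; ring
              rw [hc, ih k']
              simp [pvStepP]
        · rw [pvAParen_other d _ _ _ hd1 hd2, hidx, ih k]
          simp [pvStepP, hd1, hd2]

theorem pv_paren_eq : ∀ (t : List Char),
    pvAParen (t ++ [')']).reverse ((t ++ [')']).length - 1) 0
      = ((t ++ [')']).foldl pvStepP (0, [], none)).2.2 := by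
  intro t
  rw [List.reverse_append, List.foldl_append]
  simp only [List.reverse_cons, List.reverse_nil, List.nil_append,
    List.singleton_append, List.length_append, List.length_cons,
    List.length_nil, List.foldl_cons, List.foldl_nil]
  rw [pvAParen_close]
  have hidx : t.length + (0 + 1) - 1 - 1 = t.length - 1 := by omega
  have h0 : (0 : Int) + 1 = ((0 : Nat) : Int) + 1 := by norm_num
  rw [hidx, h0, pv_paren_inv t 0]
  cases hstk : (t.foldl pvStepP (0, [], none)).2.1 with
  | nil => simp [pvStepP, hstk]
  | cons j r => simp [pvStepP, hstk]

-- ===== VERDICT (by name: the statement is the Claim_ definition above) =====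
theorem get_after_last_operator_spec : Claim_equal_get_after_last_operator := by
  intro s _
  unfold Spec_get_after_last_operator get_after_last_operator get_after_last_operator_alt
  by_cases hc : s.toList ≠ [] ∧ s.toList.getLast? = some ')'
  · have hkey : pvAParen s.toList.reverse (s.toList.length - 1) 0
        = (s.toList.foldl pvStepP (0, [], none)).2.2 := by
      obtain ⟨hne, hlast⟩ := hc
      have hu : s.toList = s.toList.dropLast ++ [')'] := by
        conv_lhs => rw [← List.dropLast_concat_getLast hne]
        rw [List.getLast?_eq_some_getLast hne] at hlast
        simp at hlast
        rw [hlast]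
      rw [hu]
      exact pv_paren_eq s.toList.dropLast
    simp only [if_pos hc, hkey]
  · simp only [if_neg hc, pv_op_eq]
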